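-- pv_equiv track=rewrite | github.com/WilliamFrisk/AoC-2022 | src/day1/main.py | sum_of_parts
-- ===== SOURCE A (Python) =====
-- def sum_of_parts(arr: list) -> list:
--     output = []
--
--     curr_elf = 0
--     for i in arr:
--         if not is_num(i):
--             output.append(curr_elf)
--             curr_elf = 0
--         else:
--             curr_elf += int(i)
--
--     return output
--
-- def is_num(num) -> bool:
--     try:
--         int(num)
--         return True
--     except ValueError:
--         return False
-- ===== SOURCE B (Python) =====
-- def sum_of_parts(arr: list) -> list:
--     # Repeated split: find the next non-number at or after position i, emit the
--     # sum of the group arr[i:k], and continue after the separator; a trailing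
--     # run with no separator after it is never emitted.
--     out = []
--     i = 0
--     while True:
--         k = next((j for j in range(i, len(arr)) if not is_num(arr[j])), None)
--         if k is None:
--             return out
--         out.append(sum(int(x) for x in arr[i:k]))
--         i = k + 1
--
-- def is_num(num) -> bool:
--     try:
--         int(num)
--         return True
--     except ValueError:
--         return False
-- ===== Notes on version B (the rewrite author's own statement) =====
-- stated objective: alternative
-- what changed: Replaces A's single element-wise pass with a running integer accumulator by a repeated-split loop: find the index of the next non-numeric element, emit the sum of the group before it, and continue after the separator.
import Mathlib
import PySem

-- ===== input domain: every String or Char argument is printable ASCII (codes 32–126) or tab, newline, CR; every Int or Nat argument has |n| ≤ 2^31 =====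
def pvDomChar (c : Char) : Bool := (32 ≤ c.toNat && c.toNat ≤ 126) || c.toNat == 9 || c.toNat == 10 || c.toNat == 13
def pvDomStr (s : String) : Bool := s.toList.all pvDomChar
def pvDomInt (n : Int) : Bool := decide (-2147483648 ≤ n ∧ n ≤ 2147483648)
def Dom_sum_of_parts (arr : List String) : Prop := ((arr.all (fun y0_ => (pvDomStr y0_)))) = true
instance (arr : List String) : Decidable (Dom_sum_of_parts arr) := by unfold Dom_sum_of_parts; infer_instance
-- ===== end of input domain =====

-- B replaces A's single accumulator pass by a repeated split at the first non-numeric element (objective: alternative).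

-- ===== PORT A =====
-- is_num: int(num) on a str raises only ValueError, which is caught, so is_num is total on strings.
def pvIsNum (s : String) : Bool := (PySem.Int.ofStr? s).isSome
-- int(i), called by both programs only where is_num i holds (ofStr? is some); the getD 0 default is never taken there.
def pvInt (s : String) : Int := (PySem.Int.ofStr? s).getD 0

def sum_of_parts (arr : List String) : List Int :=
  (arr.foldl
    (fun (st : List Int × Int) i =>
      if !(pvIsNum i) then (st.1 ++ [st.2], (0 : Int))
      else (st.1, st.2 + pvInt i))
    (([] : List Int), (0 : Int))).1

-- ===== PORT B =====
-- the while-loop of Source B: state (out, i); 'next(j for j in range(i, len(arr)) if not is_num(arr[j]))'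
-- scans from position i, i.e. findIdx? on arr.drop i, giving the offset d with j = i + d;
-- arr[i:k] with k = i + d is (arr.drop i).take d, exact because i and k are nonnegative.
def pvAltLoopIdx (out : List Int) (i : Nat) (arr : List String) : List Int :=
  match h : (arr.drop i).findIdx? (fun x => !(pvIsNum x)) with
  | none => out
  | some d => pvAltLoopIdx (out ++ [(((arr.drop i).take d).map pvInt).sum]) (i + d + 1) arr
termination_by arr.length - i
decreasing_by
  have hd := (List.findIdx?_eq_some_iff_findIdx_eq.mp h).1
  simp [List.length_drop] at hd
  omega

def sum_of_parts_alt (arr : List String) : List Int := pvAltLoopIdx [] 0 arr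

-- ===== PRECONDITION & SPEC =====
def Spec_sum_of_parts (arr : List String) (out : List Int) : Prop := out = sum_of_parts_alt arr
instance (arr : List String) (out : List Int) : Decidable (Spec_sum_of_parts arr out) := by unfold Spec_sum_of_parts; infer_instance

-- ===== CLAIM (what is proved, stated in full; the proofs are below) =====
def Claim_equal_sum_of_parts : Prop := ∀ (arr : List String), Dom_sum_of_parts arr → Spec_sum_of_parts arr (sum_of_parts arr)

-- ===== LEMMAS AND PROOFS =====

-- list-suffix view of B's loop: pvAltLoopIdx out i arr walks arr.drop i
def pvAltLoop (out : List Int) (rest : List String) : List Int :=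
  match h : rest.findIdx? (fun x => !(pvIsNum x)) with
  | none => out
  | some k => pvAltLoop (out ++ [((rest.take k).map pvInt).sum]) (rest.drop (k + 1))
termination_by rest.length
decreasing_by
  have hk := (List.findIdx?_eq_some_iff_findIdx_eq.mp h).1
  simp [List.length_drop]; omega

theorem pvAltLoopIdx_none {arr : List String} {i : Nat} (out : List Int)
    (h : (arr.drop i).findIdx? (fun x => !(pvIsNum x)) = none) : pvAltLoopIdx out i arr = out := by
  rw [pvAltLoopIdx]; split <;> simp_all

theorem pvAltLoopIdx_some {arr : List String} {i d : Nat} (out : List Int)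
    (h : (arr.drop i).findIdx? (fun x => !(pvIsNum x)) = some d) :
    pvAltLoopIdx out i arr
      = pvAltLoopIdx (out ++ [(((arr.drop i).take d).map pvInt).sum]) (i + d + 1) arr := by
  rw [pvAltLoopIdx]; split <;> simp_all

theorem pvAltLoop_none {rest : List String} (out : List Int)
    (h : rest.findIdx? (fun x => !(pvIsNum x)) = none) : pvAltLoop out rest = out := by
  rw [pvAltLoop]; split <;> simp_all

theorem pvAltLoop_some {rest : List String} {k : Nat} (out : List Int)
    (h : rest.findIdx? (fun x => !(pvIsNum x)) = some k) :
    pvAltLoop out rest = pvAltLoop (out ++ [((rest.take k).map pvInt).sum]) (rest.drop (k + 1)) := by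
  rw [pvAltLoop]; split <;> simp_all

theorem pvAltLoop_acc_aux (n : Nat) : ∀ (rest : List String), rest.length ≤ n →
    ∀ out, pvAltLoop out rest = out ++ pvAltLoop [] rest := by
  induction n with
  | zero =>
    intro rest hn out
    have hre : rest = [] := List.eq_nil_of_length_eq_zero (by omega)
    subst hre
    rw [pvAltLoop_none out (by simp), pvAltLoop_none [] (by simp)]; simp
  | succ n ih =>
    intro rest hn out
    cases h : rest.findIdx? (fun x => !(pvIsNum x)) with
    | none => rw [pvAltLoop_none out h, pvAltLoop_none [] h]; simp
    | some k =>
      have hk := (List.findIdx?_eq_some_iff_findIdx_eq.mp h).1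
      rw [pvAltLoop_some out h, pvAltLoop_some [] h,
          ih _ (by simp [List.length_drop]; omega) _, ih _ (by simp [List.length_drop]; omega) ([] ++ _)]
      simp

theorem pvAltLoop_acc (rest : List String) (out : List Int) :
    pvAltLoop out rest = out ++ pvAltLoop [] rest :=
  pvAltLoop_acc_aux rest.length rest le_rfl out

theorem pvIdx_eq_aux (arr : List String) (n : Nat) : ∀ i, arr.length - i ≤ n →
    ∀ out, pvAltLoopIdx out i arr = pvAltLoop out (arr.drop i) := by
  induction n with
  | zero =>
    intro i hn out
    have hd : arr.drop i = [] := List.drop_eq_nil_of_le (by omega)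
    rw [pvAltLoopIdx_none out (by rw [hd]; simp), pvAltLoop_none out (by rw [hd]; simp)]
  | succ n ih =>
    intro i hn out
    cases h : (arr.drop i).findIdx? (fun x => !(pvIsNum x)) with
    | none => rw [pvAltLoopIdx_none out h, pvAltLoop_none out h]
    | some d =>
      have hd := (List.findIdx?_eq_some_iff_findIdx_eq.mp h).1
      simp [List.length_drop] at hd
      rw [pvAltLoopIdx_some out h, pvAltLoop_some out h,
          ih (i + d + 1) (by omega), List.drop_drop, Nat.add_assoc]

theorem pvIdx_eq (arr : List String) (i : Nat) (out : List Int) :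
    pvAltLoopIdx out i arr = pvAltLoop out (arr.drop i) :=
  pvIdx_eq_aux arr (arr.length - i) i le_rfl out

-- add c to the first element, if any: how A's pending accumulator c shifts B's result
def pvAddFirst (c : Int) : List Int → List Int
  | [] => []
  | y :: ys => (c + y) :: ys

theorem pvAddFirst_zero (l : List Int) : pvAddFirst 0 l = l := by
  cases l <;> simp [pvAddFirst]

theorem pv_main (rest : List String) : ∀ (out : List Int) (c : Int),
    (rest.foldl
      (fun (st : List Int × Int) i =>
        if !(pvIsNum i) then (st.1 ++ [st.2], (0 : Int))
        else (st.1, st.2 + pvInt i))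
      (out, c)).1 = out ++ pvAddFirst c (pvAltLoop [] rest) := by
  induction rest with
  | nil => intro out c; rw [pvAltLoop_none [] (by simp)]; simp [pvAddFirst]
  | cons x rest ih =>
    intro out c
    by_cases hx : pvIsNum x
    · -- numeric element
      have hfc : (x :: rest).findIdx? (fun x => !(pvIsNum x))
          = (rest.findIdx? (fun x => !(pvIsNum x))).map (· + 1) := by
        simp [List.findIdx?_cons, hx]
      simp only [List.foldl_cons, hx, Bool.not_true, Bool.false_eq_true, if_false]
      rw [ih out (c + pvInt x)]
      cases hk : rest.findIdx? (fun x => !(pvIsNum x)) with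
      | none =>
        rw [pvAltLoop_none [] hk, pvAltLoop_none [] (by rw [hfc, hk]; rfl)]
        simp [pvAddFirst]
      | some k =>
        rw [pvAltLoop_some [] hk,
            pvAltLoop_some [] (show (x :: rest).findIdx? (fun x => !(pvIsNum x)) = some (k+1) by
              rw [hfc, hk]; rfl)]
        simp only [List.take_succ_cons, List.drop_succ_cons, List.map_cons, List.sum_cons,
          List.nil_append]
        rw [pvAltLoop_acc (List.drop (k + 1) rest) [(List.map pvInt (List.take k rest)).sum],
            pvAltLoop_acc (List.drop (k + 1) rest) [pvInt x + (List.map pvInt (List.take k rest)).sum]]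
        simp [pvAddFirst]; ring
    · -- separator
      have hx' : pvIsNum x = false := by simp [hx]
      simp only [List.foldl_cons, hx', Bool.not_false, if_true]
      rw [ih (out ++ [c]) 0, pvAddFirst_zero,
          pvAltLoop_some [] (show (x :: rest).findIdx? (fun x => !(pvIsNum x)) = some 0 by
            simp [List.findIdx?_cons, hx'])]
      simp only [List.take_zero, List.map_nil, List.sum_nil, List.nil_append, Nat.zero_add,
        List.drop_one, List.tail_cons]
      rw [pvAltLoop_acc rest [0]]
      simp [pvAddFirst]

-- ===== VERDICT (by name: the statement is the Claim_ definition above) =====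
theorem sum_of_parts_spec : Claim_equal_sum_of_parts := by
  intro arr _
  unfold Spec_sum_of_parts sum_of_parts sum_of_parts_alt
  rw [pv_main arr [] 0, pvAddFirst_zero, pvIdx_eq arr 0 [], List.drop_zero]
  simp
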